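-- pv_equiv track=rewrite | github.com/juliarzymowska/WDI | lesson_programs/zad102.py | zad102
-- ===== SOURCE A (Python) =====
-- def same_digits(number: int) -> list:
-- 	tab = []
--
-- 	while number > 0:
-- 		tab.append(number % 10)
-- 		number //= 10
--
-- 	return tab
--
-- def zad102(t: list) -> int:
-- 	ans = 0
-- 	n = len(t)
-- 	digits = [[0 for _ in range(n)] for _ in range(n)]
--
-- 	for i in range(n):
-- 		for j in range(n):
-- 			digits[i][j] = same_digits(t[i][j])
--
-- 	for i in range(n):
-- 		for j in range(n):
-- 			if i + 1 < n and j + 1 < n: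
-- 				if digits[i][j] == digits[i + 1][j + 1]:
-- 					ans += 1
-- 			if i + 1 < n and j - 1 >= 0:
-- 				if digits[i][j] == digits[i + 1][j - 1]:
-- 					ans += 1
-- 			if i - 1 >= 0 and j + 1 < n:
-- 				if digits[i][j] == digits[i - 1][j + 1]:
-- 					ans += 1
-- 			if i - 1 >= 0 and j - 1 >= 0:
-- 				if digits[i][j] == digits[i - 1][j - 1]:
-- 					ans += 1
--
-- 	return ans
-- ===== SOURCE B (Python) =====
-- def same_digits(number: int) -> list:
-- 	tab = []
--
-- 	while number > 0:
-- 		tab.append(number % 10)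
-- 		number //= 10
--
-- 	return tab
--
-- def zad102(t: list) -> int:
-- 	# Regroup the grid by diagonals: extract every main diagonal (i-j constant)
-- 	# and every anti diagonal (i+j constant) as a 1-D list, count adjacent equal
-- 	# elements in each list, and double (A counts every pair from both endpoints).
-- 	n = len(t)
-- 	digits = [[same_digits(t[i][j]) for j in range(n)] for i in range(n)]
-- 	lines = []
-- 	for d in range(-(n - 1), n):          # main diagonals: i - j == d
-- 		lines.append([digits[i][i - d] for i in range(max(0, d), min(n, n + d))])
-- 	for s in range(2 * n - 1):            # anti diagonals: i + j == s
-- 		lines.append([digits[i][s - i] for i in range(max(0, s - n + 1), min(n, s + 1))])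
-- 	ans = 0
-- 	for line in lines:
-- 		for a, b in zip(line, line[1:]):
-- 			if a == b:
-- 				ans += 2
-- 	return ans
-- ===== Notes on version B (the rewrite author's own statement) =====
-- stated objective: alternative
-- what changed: B regroups the grid by diagonals: it extracts every main (i-j constant) and every anti (i+j constant) diagonal as a 1-D list, counts adjacent equal elements inside each list with zip, and doubles each match (A counts every pair from both endpoints), instead of A's per-cell scan over four boundary-guarded diagonal neighbours.
import Mathlib
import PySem

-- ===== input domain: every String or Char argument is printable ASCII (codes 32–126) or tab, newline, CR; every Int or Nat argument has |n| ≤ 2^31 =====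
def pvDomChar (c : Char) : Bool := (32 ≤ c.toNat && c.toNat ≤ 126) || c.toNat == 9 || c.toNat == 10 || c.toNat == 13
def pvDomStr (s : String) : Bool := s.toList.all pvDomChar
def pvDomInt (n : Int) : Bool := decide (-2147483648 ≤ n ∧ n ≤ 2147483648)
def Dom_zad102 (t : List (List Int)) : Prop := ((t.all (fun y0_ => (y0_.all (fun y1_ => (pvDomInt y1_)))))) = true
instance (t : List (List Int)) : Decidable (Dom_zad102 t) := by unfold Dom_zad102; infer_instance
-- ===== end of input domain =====

-- B regroups the grid by diagonals: every main (i-j constant) and anti (i+j constant) diagonal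
-- is extracted as a 1-D list, adjacent equal elements in each list are counted and doubled
-- (A counts every pair from both endpoints via four boundary-guarded neighbour checks per cell).

-- ===== PORT A =====
def same_digits (number : Int) : List Int :=
  if _h : 0 < number then
    PySem.Int.mod number 10 :: same_digits (PySem.Int.floordiv number 10)
  else []
termination_by number.toNat
decreasing_by
  have h0 : number = (number.toNat : Int) := (Int.toNat_of_nonneg (le_of_lt _h)).symm
  rw [h0, show ((10:Int)) = ((10:Nat):Int) from rfl, PySem.Int.floordiv_natCast]
  simp only [Int.toNat_natCast]
  exact Nat.div_lt_self (by omega) (by omega)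

-- the digits grid A fills: digits[i][j] = same_digits(t[i][j]) for i, j in range(n)
def pvDigitsA (t : List (List Int)) : List (List (List Int)) :=
  (PySem.List.pyRange 0 (t.length : Int)).map (fun i =>
    (PySem.List.pyRange 0 (t.length : Int)).map (fun j =>
      same_digits (PySem.List.pyGetD (PySem.List.pyGetD t i []) j 0)))

def zad102 (t : List (List Int)) : Int :=
  let n : Int := t.length
  let digits := pvDigitsA t
  (PySem.List.pyRange 0 n).foldl (fun ans i =>
    (PySem.List.pyRange 0 n).foldl (fun ans j =>
      let ans := if i + 1 < n ∧ j + 1 < n then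
          (if PySem.List.pyGetD (PySem.List.pyGetD digits i []) j [] =
              PySem.List.pyGetD (PySem.List.pyGetD digits (i + 1) []) (j + 1) []
           then ans + 1 else ans) else ans
      let ans := if i + 1 < n ∧ j - 1 ≥ 0 then
          (if PySem.List.pyGetD (PySem.List.pyGetD digits i []) j [] =
              PySem.List.pyGetD (PySem.List.pyGetD digits (i + 1) []) (j - 1) []
           then ans + 1 else ans) else ans
      let ans := if i - 1 ≥ 0 ∧ j + 1 < n then
          (if PySem.List.pyGetD (PySem.List.pyGetD digits i []) j [] =
              PySem.List.pyGetD (PySem.List.pyGetD digits (i - 1) []) (j + 1) []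
           then ans + 1 else ans) else ans
      let ans := if i - 1 ≥ 0 ∧ j - 1 ≥ 0 then
          (if PySem.List.pyGetD (PySem.List.pyGetD digits i []) j [] =
              PySem.List.pyGetD (PySem.List.pyGetD digits (i - 1) []) (j - 1) []
           then ans + 1 else ans) else ans
      ans) ans) 0

-- ===== PORT B =====
-- B's digits grid: [[same_digits(t[i][j]) for j in range(n)] for i in range(n)]
def pvDigitsB (t : List (List Int)) : List (List (List Int)) :=
  (PySem.List.pyRange 0 (t.length : Int)).map (fun i =>
    (PySem.List.pyRange 0 (t.length : Int)).map (fun j =>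
      same_digits (PySem.List.pyGetD (PySem.List.pyGetD t i []) j 0)))

def zad102_alt (t : List (List Int)) : Int :=
  let n : Int := t.length
  let digits := pvDigitsB t
  -- lines = the main diagonals (i - j == d) followed by the anti diagonals (i + j == s)
  let lines :=
    ((PySem.List.pyRange (-(n - 1)) n).map (fun d =>
      (PySem.List.pyRange (max 0 d) (min n (n + d))).map (fun i =>
        PySem.List.pyGetD (PySem.List.pyGetD digits i []) (i - d) [])))
    ++ ((PySem.List.pyRange 0 (2 * n - 1)).map (fun s =>
      (PySem.List.pyRange (max 0 (s - n + 1)) (min n (s + 1))).map (fun i =>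
        PySem.List.pyGetD (PySem.List.pyGetD digits i []) (s - i) [])))
  -- for line in lines: for a, b in zip(line, line[1:]): if a == b: ans += 2
  lines.foldl (fun ans line =>
    (line.zip (PySem.List.slice line (some 1) none)).foldl
      (fun ans p => if p.1 = p.2 then ans + 2 else ans) ans) 0

-- ===== PRECONDITION & SPEC =====
-- Pre_: every row has at least len(t) entries — Python A indexes t[i][j] for all i, j < len(t)
-- and raises IndexError on a shorter row.
def Pre_zad102 (t : List (List Int)) : Prop := ∀ row ∈ t, t.length ≤ row.length
instance (t : List (List Int)) : Decidable (Pre_zad102 t) := by unfold Pre_zad102; infer_instance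

def pvWitness_zad102 : List (List Int) := [[12, 21], [21, 3]]

def Spec_zad102 (t : List (List Int)) (out : Int) : Prop := out = zad102_alt t
instance (t : List (List Int)) (out : Int) : Decidable (Spec_zad102 t out) := by unfold Spec_zad102; infer_instance

-- ===== CLAIM (what is proved, stated in full; the proofs are below) =====
def Claim_equal_zad102 : Prop := ∀ (t : List (List Int)), Dom_zad102 t → Pre_zad102 t → Spec_zad102 t (zad102 t)

-- ===== LEMMAS AND PROOFS =====

-- the digit list of cell (i, j), with Python-irrelevant defaults (same_digits 0 = [])
def dg (t : List (List Int)) (i j : ℕ) : List Int := same_digits ((t.getD i []).getD j 0)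

-- finite sum over range n
def S (n : ℕ) (f : ℕ → Int) : Int := ((List.range n).map f).sum

-- the two per-direction pair counts both programs compute
def Mc (t : List (List Int)) : Int :=
  S (t.length - 1) (fun i => S (t.length - 1) (fun j => if dg t i j = dg t (i+1) (j+1) then 1 else 0))
def Av (t : List (List Int)) : Int :=
  S (t.length - 1) (fun i => S (t.length - 1) (fun j => if dg t i (j+1) = dg t (i+1) j then 1 else 0))

lemma S_congr {n : ℕ} {f h : ℕ → Int} (he : ∀ i, i < n → f i = h i) : S n f = S n h := by
  unfold S
  exact congrArg List.sum (List.map_congr_left (fun i hi => he i (List.mem_range.mp hi)))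

lemma S_add (n : ℕ) (f h : ℕ → Int) : S n (fun i => f i + h i) = S n f + S n h := by
  unfold S; exact PySem.List.sum_map_add_int _ f h

lemma S_zero (n : ℕ) : S n (fun _ => (0:Int)) = 0 := by
  unfold S; induction n with
  | zero => simp
  | succ m ih => rw [List.range_succ]; simp_all

lemma S_two_mul (n : ℕ) (f : ℕ → Int) : S n (fun i => 2 * f i) = 2 * S n f := by
  unfold S; exact List.sum_map_mul_left _ f 2

lemma S_front (n : ℕ) (f : ℕ → Int) : S (n + 1) f = f 0 + S n (fun k => f (k + 1)) := by
  unfold S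
  rw [List.range_succ_eq_map, List.map_cons, List.map_map, List.sum_cons]
  rfl

lemma S_ite_const (n : ℕ) (c : Prop) [Decidable c] (f : ℕ → Int) :
    S n (fun i => if c then f i else 0) = if c then S n f else 0 := by
  by_cases h : c <;> simp [h, S_zero]

lemma Sguard_hi (n : ℕ) (f : ℕ → Int) :
    S n (fun i => if i + 1 < n then f i else 0) = S (n - 1) f := by
  cases n with
  | zero => simp [S]
  | succ m =>
    unfold S
    rw [List.range_succ, List.map_append, List.sum_append]
    simp only [List.map_cons, List.map_nil, List.sum_cons, List.sum_nil]
    rw [if_neg (by omega)]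
    have : ∀ i ∈ List.range m, (if i + 1 < m + 1 then f i else 0) = f i := by
      intro i hi; rw [if_pos (by have := List.mem_range.mp hi; omega)]
    rw [List.map_congr_left this]
    simp

lemma Sguard_lo2 (n : ℕ) (h : ℕ → Int) (h0 : h 0 = 0) :
    S n h = S (n - 1) (fun k => h (k + 1)) := by
  cases n with
  | zero => simp [S]
  | succ m =>
    unfold S
    rw [List.range_succ_eq_map, List.map_cons, List.map_map, List.sum_cons, h0, zero_add]
    rfl

-- splitting A's guarded count step into 'old + indicator'
lemma step1 (ans : Int) (c d : Prop) [Decidable c] [Decidable d] :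
    (if c then (if d then ans + 1 else ans) else ans) = ans + (if c ∧ d then 1 else 0) := by
  by_cases hc : c <;> by_cases hd : d <;> simp [hc, hd]

lemma ite_and_congr {c c' d d' : Prop} [Decidable c] [Decidable c'] [Decidable d] [Decidable d']
    (hcc : c ↔ c') (hdd : c' → (d ↔ d')) :
    (if c ∧ d then (1:Int) else 0) = (if c' ∧ d' then 1 else 0) := by
  by_cases h : c'
  · exact if_congr (and_congr hcc (hdd h)) rfl rfl
  · rw [if_neg (fun hh => h (hcc.mp hh.1)), if_neg (fun hh => h hh.1)]

-- A's grid lookup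
lemma digitsA_lookup (t : List (List Int)) (i j : ℕ)
    (hi : i < t.length) (hj : j < t.length) :
    PySem.List.pyGetD (PySem.List.pyGetD (pvDigitsA t) (i : Int) []) (j : Int) [] = dg t i j := by
  unfold pvDigitsA
  rw [PySem.List.pyGetD_map_pyRange _ t.length i _ hi,
      PySem.List.pyGetD_map_pyRange _ t.length j _ hj,
      PySem.List.pyGetD_natCast, PySem.List.pyGetD_natCast]
  rfl

lemma digitsB_eq (t : List (List Int)) : pvDigitsB t = pvDigitsA t := rfl

-- turning a Python 'for' accumulation into a sum over range
lemma foldl_to_S (n : ℕ) (f : Int → ℕ → Int) (T : ℕ → Int) (a : Int)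
    (h : ∀ acc : Int, ∀ i, i < n → f acc i = acc + T i) :
    List.foldl f a (List.range n) = a + S n T := by
  rw [PySem.List.foldl_congr_mem _ f (fun acc i => acc + T i) a
        (fun acc i hi => h acc i (List.mem_range.mp hi)),
      PySem.List.foldl_add]
  rfl

-- characterization of port A as a double sum of indicators
lemma A_char (t : List (List Int)) :
    zad102 t = S t.length (fun i => S t.length (fun j =>
        (if (i + 1 < t.length ∧ j + 1 < t.length) ∧ dg t i j = dg t (i+1) (j+1) then (1:Int) else 0)
      + (if (i + 1 < t.length ∧ 1 ≤ j) ∧ dg t i j = dg t (i+1) (j-1) then 1 else 0)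
      + (if (1 ≤ i ∧ j + 1 < t.length) ∧ dg t i j = dg t (i-1) (j+1) then 1 else 0)
      + (if (1 ≤ i ∧ 1 ≤ j) ∧ dg t i j = dg t (i-1) (j-1) then 1 else 0))) := by
  simp only [zad102, PySem.List.pyRange_zero_nat, List.foldl_map]
  rw [show S t.length (fun i => S t.length (fun j =>
        (if (i + 1 < t.length ∧ j + 1 < t.length) ∧ dg t i j = dg t (i+1) (j+1) then (1:Int) else 0)
      + (if (i + 1 < t.length ∧ 1 ≤ j) ∧ dg t i j = dg t (i+1) (j-1) then 1 else 0)
      + (if (1 ≤ i ∧ j + 1 < t.length) ∧ dg t i j = dg t (i-1) (j+1) then 1 else 0)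
      + (if (1 ≤ i ∧ 1 ≤ j) ∧ dg t i j = dg t (i-1) (j-1) then 1 else 0)))
      = 0 + S t.length (fun i => S t.length (fun j =>
        (if (i + 1 < t.length ∧ j + 1 < t.length) ∧ dg t i j = dg t (i+1) (j+1) then (1:Int) else 0)
      + (if (i + 1 < t.length ∧ 1 ≤ j) ∧ dg t i j = dg t (i+1) (j-1) then 1 else 0)
      + (if (1 ≤ i ∧ j + 1 < t.length) ∧ dg t i j = dg t (i-1) (j+1) then 1 else 0)
      + (if (1 ≤ i ∧ 1 ≤ j) ∧ dg t i j = dg t (i-1) (j-1) then 1 else 0)))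
      from (zero_add _).symm]
  apply foldl_to_S
  intro acc i hi
  apply foldl_to_S
  intro acc' j hj
  simp only [step1]
  have e1 : (if ((i:Int) + 1 < (t.length:Int) ∧ (j:Int) + 1 < (t.length:Int)) ∧
        PySem.List.pyGetD (PySem.List.pyGetD (pvDigitsA t) (i:Int) []) (j:Int) [] =
        PySem.List.pyGetD (PySem.List.pyGetD (pvDigitsA t) ((i:Int) + 1) []) ((j:Int) + 1) []
      then (1:Int) else 0)
      = (if (i + 1 < t.length ∧ j + 1 < t.length) ∧ dg t i j = dg t (i+1) (j+1) then 1 else 0) := by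
    refine ite_and_congr (by omega) (fun hc => ?_)
    rw [show ((i:Int) + 1) = ((i+1 : ℕ) : Int) from by omega,
        show ((j:Int) + 1) = ((j+1 : ℕ) : Int) from by omega,
        digitsA_lookup t i j hi hj,
        digitsA_lookup t (i+1) (j+1) (by omega) (by omega)]
  have e2 : (if ((i:Int) + 1 < (t.length:Int) ∧ (j:Int) - 1 ≥ 0) ∧
        PySem.List.pyGetD (PySem.List.pyGetD (pvDigitsA t) (i:Int) []) (j:Int) [] =
        PySem.List.pyGetD (PySem.List.pyGetD (pvDigitsA t) ((i:Int) + 1) []) ((j:Int) - 1) []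
      then (1:Int) else 0)
      = (if (i + 1 < t.length ∧ 1 ≤ j) ∧ dg t i j = dg t (i+1) (j-1) then 1 else 0) := by
    refine ite_and_congr (by omega) (fun hc => ?_)
    rw [show ((i:Int) + 1) = ((i+1 : ℕ) : Int) from by omega,
        show ((j:Int) - 1) = ((j-1 : ℕ) : Int) from by omega,
        digitsA_lookup t i j hi hj,
        digitsA_lookup t (i+1) (j-1) (by omega) (by omega)]
  have e3 : (if ((i:Int) - 1 ≥ 0 ∧ (j:Int) + 1 < (t.length:Int)) ∧
        PySem.List.pyGetD (PySem.List.pyGetD (pvDigitsA t) (i:Int) []) (j:Int) [] =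
        PySem.List.pyGetD (PySem.List.pyGetD (pvDigitsA t) ((i:Int) - 1) []) ((j:Int) + 1) []
      then (1:Int) else 0)
      = (if (1 ≤ i ∧ j + 1 < t.length) ∧ dg t i j = dg t (i-1) (j+1) then 1 else 0) := by
    refine ite_and_congr (by omega) (fun hc => ?_)
    rw [show ((i:Int) - 1) = ((i-1 : ℕ) : Int) from by omega,
        show ((j:Int) + 1) = ((j+1 : ℕ) : Int) from by omega,
        digitsA_lookup t i j hi hj,
        digitsA_lookup t (i-1) (j+1) (by omega) (by omega)]
  have e4 : (if ((i:Int) - 1 ≥ 0 ∧ (j:Int) - 1 ≥ 0) ∧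
        PySem.List.pyGetD (PySem.List.pyGetD (pvDigitsA t) (i:Int) []) (j:Int) [] =
        PySem.List.pyGetD (PySem.List.pyGetD (pvDigitsA t) ((i:Int) - 1) []) ((j:Int) - 1) []
      then (1:Int) else 0)
      = (if (1 ≤ i ∧ 1 ≤ j) ∧ dg t i j = dg t (i-1) (j-1) then 1 else 0) := by
    refine ite_and_congr (by omega) (fun hc => ?_)
    rw [show ((i:Int) - 1) = ((i-1 : ℕ) : Int) from by omega,
        show ((j:Int) - 1) = ((j-1 : ℕ) : Int) from by omega,
        digitsA_lookup t i j hi hj,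
        digitsA_lookup t (i-1) (j-1) (by omega) (by omega)]
  rw [e1, e2, e3, e4]
  ring

-- nested-guard expansion of a conjunction indicator
lemma expand_ite (a b d : Prop) [Decidable a] [Decidable b] [Decidable d] :
    (if (a ∧ b) ∧ d then (1:Int) else 0)
      = if a then (if b then (if d then 1 else 0) else 0) else 0 := by
  split_ifs <;> simp_all

-- the four single-direction pieces of A's count
lemma piece1 (n : ℕ) (g : ℕ → ℕ → List Int) :
    S n (fun i => S n (fun j =>
        if (i + 1 < n ∧ j + 1 < n) ∧ g i j = g (i+1) (j+1) then (1:Int) else 0))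
    = S (n-1) (fun i => S (n-1) (fun j => if g i j = g (i+1) (j+1) then (1:Int) else 0)) := by
  simp only [expand_ite, S_ite_const, Sguard_hi]

lemma piece2 (n : ℕ) (g : ℕ → ℕ → List Int) :
    S n (fun i => S n (fun j =>
        if (i + 1 < n ∧ 1 ≤ j) ∧ g i j = g (i+1) (j-1) then (1:Int) else 0))
    = S (n-1) (fun i => S (n-1) (fun j => if g i (j+1) = g (i+1) j then (1:Int) else 0)) := by
  simp only [expand_ite, S_ite_const]
  have inner : ∀ i : ℕ,
      S n (fun j => if 1 ≤ j then (if g i j = g (i+1) (j-1) then (1:Int) else 0) else 0)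
      = S (n-1) (fun j => if g i (j+1) = g (i+1) j then (1:Int) else 0) := by
    intro i
    rw [Sguard_lo2 n _ (by simp)]
    refine S_congr (fun k _ => ?_)
    rw [if_pos (by omega : 1 ≤ k + 1)]
    simp only [Nat.add_sub_cancel]
  simp only [inner, Sguard_hi]

lemma piece3 (n : ℕ) (g : ℕ → ℕ → List Int) :
    S n (fun i => S n (fun j =>
        if (1 ≤ i ∧ j + 1 < n) ∧ g i j = g (i-1) (j+1) then (1:Int) else 0))
    = S (n-1) (fun i => S (n-1) (fun j => if g i (j+1) = g (i+1) j then (1:Int) else 0)) := by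
  simp only [expand_ite, S_ite_const, Sguard_hi]
  rw [Sguard_lo2 n _ (by simp)]
  refine S_congr (fun k _ => ?_)
  rw [if_pos (by omega : 1 ≤ k + 1)]
  simp only [Nat.add_sub_cancel]
  exact S_congr (fun j _ => if_congr eq_comm rfl rfl)

lemma piece4 (n : ℕ) (g : ℕ → ℕ → List Int) :
    S n (fun i => S n (fun j =>
        if (1 ≤ i ∧ 1 ≤ j) ∧ g i j = g (i-1) (j-1) then (1:Int) else 0))
    = S (n-1) (fun i => S (n-1) (fun j => if g i j = g (i+1) (j+1) then (1:Int) else 0)) := by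
  simp only [expand_ite, S_ite_const]
  have inner : ∀ i : ℕ,
      S n (fun j => if 1 ≤ j then (if g i j = g (i-1) (j-1) then (1:Int) else 0) else 0)
      = S (n-1) (fun j => if g i (j+1) = g (i-1) j then (1:Int) else 0) := by
    intro i
    rw [Sguard_lo2 n _ (by simp)]
    refine S_congr (fun k _ => ?_)
    rw [if_pos (by omega : 1 ≤ k + 1)]
    simp only [Nat.add_sub_cancel]
  simp only [inner]
  rw [Sguard_lo2 n _ (by simp)]
  refine S_congr (fun k _ => ?_)
  rw [if_pos (by omega : 1 ≤ k + 1)]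
  simp only [Nat.add_sub_cancel]
  exact S_congr (fun j _ => if_congr eq_comm rfl rfl)

-- A counts every diagonal pair from both endpoints: twice each per-direction count
lemma A_eq (t : List (List Int)) : zad102 t = 2 * Mc t + 2 * Av t := by
  rw [A_char]
  simp only [S_add]
  rw [piece1 t.length (dg t), piece2 t.length (dg t), piece3 t.length (dg t),
      piece4 t.length (dg t)]
  unfold Mc Av
  ring

-- ===== B side: adjacent-pair counting along a list =====

def ind2 (p : List Int × List Int) : Int := if p.1 = p.2 then 2 else 0

-- the value B adds for one diagonal line
def W (line : List (List Int)) : Int := ((line.zip line.tail).map ind2).sum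

lemma W_nil : W [] = 0 := rfl
lemma W_single (x : List Int) : W [x] = 0 := rfl
lemma W_cons_cons (x y : List Int) (l : List (List Int)) :
    W (x :: y :: l) = ind2 (x, y) + W (y :: l) := by
  simp [W, List.zip]

-- adjacent-pair count of a range-comprehension line, as a sum of indicators
lemma W_map_range : ∀ (m : ℕ) (h : ℕ → List Int),
    W ((List.range m).map h) = 2 * S (m - 1) (fun k => if h k = h (k+1) then 1 else 0) := by
  intro m
  induction m with
  | zero => intro h; simp [W, S]
  | succ m ih =>
    intro h
    have key : (List.range (m+1)).map h = h 0 :: (List.range m).map (fun k => h (k+1)) := by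
      rw [List.range_succ_eq_map, List.map_cons, List.map_map]
      congr 1
    rw [key]
    cases m with
    | zero => simp [W, S]
    | succ m' =>
      have key2 : (List.range (m'+1)).map (fun k => h (k+1))
          = h 1 :: (List.range m').map (fun k => h (k+2)) := by
        rw [List.range_succ_eq_map, List.map_cons, List.map_map]
        congr 1
      rw [key2, W_cons_cons, ← key2, ih (fun k => h (k+1))]
      have hs : S (m' + 1 + 1 - 1) (fun k => if h k = h (k+1) then (1:Int) else 0)
          = (if h 0 = h 1 then (1:Int) else 0)
            + S m' (fun k => if h (k+1) = h (k+1+1) then (1:Int) else 0) := by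
        rw [show m' + 1 + 1 - 1 = m' + 1 from rfl, S_front]
      rw [hs]
      simp only [Nat.add_sub_cancel, ind2]
      split_ifs <;> ring

-- linearity of B's inner fold in its accumulator
lemma inner_fold_tail (line : List (List Int)) (a : Int) :
    (line.zip line.tail).foldl
      (fun ans p => if p.1 = p.2 then ans + 2 else ans) a = a + W line := by
  induction line generalizing a with
  | nil => simp [W_nil]
  | cons x rest ih =>
    cases rest with
    | nil => simp [W_single]
    | cons y l =>
      rw [W_cons_cons]
      have hz : ((x :: y :: l).zip (x :: y :: l).tail)
          = (x, y) :: ((y :: l).zip (y :: l).tail) := rfl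
      rw [hz, List.foldl_cons, ih]
      unfold ind2
      split_ifs <;> ring

lemma inner_fold_eq (line : List (List Int)) (a : Int) :
    (line.zip (PySem.List.slice line (some 1) none)).foldl
      (fun ans p => if p.1 = p.2 then ans + 2 else ans) a = a + W line := by
  rw [PySem.List.slice_from_one, ← List.drop_one, List.drop_one]
  exact inner_fold_tail line a

-- B's outer fold is the sum of W over the diagonal lines
lemma outer_fold_eq (lines : List (List (List Int))) (a : Int) :
    lines.foldl (fun ans line =>
      (line.zip (PySem.List.slice line (some 1) none)).foldl
        (fun ans p => if p.1 = p.2 then ans + 2 else ans) ans) a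
    = a + (lines.map W).sum := by
  induction lines generalizing a with
  | nil => simp
  | cons line rest ih =>
    rw [List.foldl_cons, inner_fold_eq, ih, List.map_cons, List.sum_cons]
    ring

-- ===== the reindexing: diagonal-grouped sums equal row-column double sums =====

lemma S_eq_finset (n : ℕ) (f : ℕ → Int) : S n f = ∑ i ∈ Finset.range n, f i := by
  induction n with
  | zero => simp [S]
  | succ m ih =>
    unfold S at *
    rw [List.range_succ, List.map_append, List.sum_append, Finset.sum_range_succ, ih]
    simp

lemma reindex_main (n : ℕ) (F : ℕ → ℕ → Int) :
    S (2*n - 1) (fun d => S (min d (2*n - 2 - d)) (fun k =>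
        F (k + (d - (n-1))) (k + ((n-1) - d))))
    = S (n-1) (fun i => S (n-1) (fun j => F i j)) := by
  simp only [S_eq_finset]
  rw [Finset.sum_sigma', ← Finset.sum_product']
  refine Finset.sum_nbij' (i := fun p => (p.2 + (p.1 - (n-1)), p.2 + ((n-1) - p.1)))
    (j := fun p => ⟨p.1 + (n-1) - p.2, min p.1 p.2⟩) ?_ ?_ ?_ ?_ ?_
  · rintro ⟨d, k⟩ hm
    simp only [Finset.mem_sigma, Finset.mem_range] at hm
    simp only [Finset.mem_product, Finset.mem_range]
    omega
  · rintro ⟨i, j⟩ hm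
    simp only [Finset.mem_product, Finset.mem_range] at hm
    simp only [Finset.mem_sigma, Finset.mem_range]
    omega
  · rintro ⟨d, k⟩ hm
    simp only [Finset.mem_sigma, Finset.mem_range] at hm
    simp only [Sigma.mk.injEq, heq_eq_eq]
    omega
  · rintro ⟨i, j⟩ hm
    simp only [Finset.mem_product, Finset.mem_range] at hm
    simp only [Prod.mk.injEq]
    omega
  · rintro ⟨d, k⟩ _
    rfl

lemma reindex_anti (n : ℕ) (F : ℕ → ℕ → Int) :
    S (2*n - 1) (fun s => S (min s (2*n - 2 - s)) (fun k =>
        F (k + (s - (n-1))) (s - 1 - (k + (s - (n-1))))))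
    = S (n-1) (fun i => S (n-1) (fun j => F i j)) := by
  simp only [S_eq_finset]
  rw [Finset.sum_sigma', ← Finset.sum_product']
  refine Finset.sum_nbij' (i := fun p => (p.2 + (p.1 - (n-1)), p.1 - 1 - (p.2 + (p.1 - (n-1)))))
    (j := fun p => ⟨p.1 + p.2 + 1, min p.1 (n - 2 - p.2)⟩) ?_ ?_ ?_ ?_ ?_
  · rintro ⟨s, k⟩ hm
    simp only [Finset.mem_sigma, Finset.mem_range] at hm
    simp only [Finset.mem_product, Finset.mem_range]
    omega
  · rintro ⟨i, j⟩ hm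
    simp only [Finset.mem_product, Finset.mem_range] at hm
    simp only [Finset.mem_sigma, Finset.mem_range]
    omega
  · rintro ⟨s, k⟩ hm
    simp only [Finset.mem_sigma, Finset.mem_range] at hm
    simp only [Sigma.mk.injEq, heq_eq_eq]
    omega
  · rintro ⟨i, j⟩ hm
    simp only [Finset.mem_product, Finset.mem_range] at hm
    simp only [Prod.mk.injEq]
    omega
  · rintro ⟨s, k⟩ _
    rfl

-- ===== B characterization =====

lemma B_eq (t : List (List Int)) : zad102_alt t = 2 * Mc t + 2 * Av t := by
  simp only [zad102_alt]
  rw [outer_fold_eq, List.map_append, List.sum_append, List.map_map, List.map_map,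
      PySem.List.pyRange_one (-((t.length:Int) - 1)) (t.length:Int),
      PySem.List.pyRange_one 0 (2*(t.length:Int) - 1),
      List.map_map, List.map_map, zero_add]
  have hS : ∀ (g : ℕ → Int),
      ((List.range (((t.length:Int) - -((t.length:Int) - 1)).toNat)).map g).sum
        = S (2 * t.length - 1) g := by
    intro g
    have hM : (((t.length:Int) - -((t.length:Int) - 1)).toNat) = 2 * t.length - 1 := by omega
    rw [hM]; rfl
  have hS2 : ∀ (g : ℕ → Int),
      ((List.range ((2*(t.length:Int) - 1 - 0).toNat)).map g).sum
        = S (2 * t.length - 1) g := by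
    intro g
    have hM : ((2*(t.length:Int) - 1 - 0).toNat) = 2 * t.length - 1 := by omega
    rw [hM]; rfl
  rw [hS, hS2]
  unfold Mc Av
  rw [← reindex_main t.length (fun i j => if dg t i j = dg t (i+1) (j+1) then (1:Int) else 0),
      ← reindex_anti t.length (fun i j => if dg t i (j+1) = dg t (i+1) j then (1:Int) else 0),
      ← S_two_mul, ← S_two_mul]
  refine congrArg₂ (· + ·) (S_congr fun d' hd => ?_) (S_congr fun s' hs => ?_)
  · -- one main diagonal (i - j = d' - (n-1))
    simp only [Function.comp_apply]
    rw [PySem.List.pyRange_one, List.map_map, W_map_range]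
    have hm : ((min ((t.length:Int)) ((t.length:Int) + (-((t.length:Int) - 1) + (d':Int)))
          - max 0 (-((t.length:Int) - 1) + (d':Int))).toNat - 1)
        = min d' (2 * t.length - 2 - d') := by omega
    rw [hm]
    refine congrArg (2 * ·) (S_congr fun k hk => ?_)
    simp only [Function.comp_apply]
    rw [digitsB_eq]
    have e1 : (max 0 (-((t.length:Int) - 1) + (d':Int)) + (k:Int))
        = ((k + (d' - (t.length - 1)) : ℕ) : Int) := by omega
    have e2 : ((k + (d' - (t.length - 1)) : ℕ) : Int) - (-((t.length:Int) - 1) + (d':Int))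
        = ((k + ((t.length - 1) - d') : ℕ) : Int) := by omega
    have e3 : (max 0 (-((t.length:Int) - 1) + (d':Int)) + ((k+1:ℕ):Int))
        = ((k + (d' - (t.length - 1)) + 1 : ℕ) : Int) := by omega
    have e4 : ((k + (d' - (t.length - 1)) + 1 : ℕ) : Int) - (-((t.length:Int) - 1) + (d':Int))
        = ((k + ((t.length - 1) - d') + 1 : ℕ) : Int) := by omega
    have L1 := digitsA_lookup t (k + (d' - (t.length - 1))) (k + ((t.length - 1) - d'))
      (by omega) (by omega)
    have L2 := digitsA_lookup t (k + (d' - (t.length - 1)) + 1) (k + ((t.length - 1) - d') + 1)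
      (by omega) (by omega)
    simp only [e1, e2, e3, e4, L1, L2]
  · -- one anti diagonal (i + j = s')
    simp only [Function.comp_apply]
    rw [PySem.List.pyRange_one, List.map_map, W_map_range]
    have hm : ((min ((t.length:Int)) ((0 + (s':Int)) + 1)
          - max 0 ((0 + (s':Int)) - (t.length:Int) + 1)).toNat - 1)
        = min s' (2 * t.length - 2 - s') := by omega
    rw [hm]
    refine congrArg (2 * ·) (S_congr fun k hk => ?_)
    simp only [Function.comp_apply]
    rw [digitsB_eq]
    have e1 : (max 0 ((0 + (s':Int)) - (t.length:Int) + 1) + (k:Int))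
        = ((k + (s' - (t.length - 1)) : ℕ) : Int) := by omega
    have e2 : (0 + (s':Int)) - ((k + (s' - (t.length - 1)) : ℕ) : Int)
        = (((s' - 1 - (k + (s' - (t.length - 1)))) + 1 : ℕ) : Int) := by omega
    have e3 : (max 0 ((0 + (s':Int)) - (t.length:Int) + 1) + ((k+1:ℕ):Int))
        = ((k + (s' - (t.length - 1)) + 1 : ℕ) : Int) := by omega
    have e4 : (0 + (s':Int)) - ((k + (s' - (t.length - 1)) + 1 : ℕ) : Int)
        = ((s' - 1 - (k + (s' - (t.length - 1))) : ℕ) : Int) := by omega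
    have L1 := digitsA_lookup t (k + (s' - (t.length - 1)))
      ((s' - 1 - (k + (s' - (t.length - 1)))) + 1) (by omega) (by omega)
    have L2 := digitsA_lookup t (k + (s' - (t.length - 1)) + 1)
      (s' - 1 - (k + (s' - (t.length - 1)))) (by omega) (by omega)
    simp only [e1, e2, e3, e4, L1, L2]

-- ===== VERDICT (by name: the statement is the Claim_ definition above) =====
theorem zad102_spec : Claim_equal_zad102 := by
  intro t _ _
  unfold Spec_zad102
  rw [A_eq, B_eq]
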